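-- pv_equiv track=rewrite | github.com/NikuTabehoudai/The-Farmer-Was-Replaced-Dave | Tools.py | sortSunflowers
-- ===== SOURCE A (Python) =====
-- def sortSunflowers(input):
-- 	sortedlist = []
-- 	petals = 15
-- 	while petals > 6:
-- 		for i in input:
-- 			if i[0] == petals:
-- 				sortedlist.append(i[1])
-- 		petals = petals - 1
-- 	return sortedlist
-- ===== SOURCE B (Python) =====
-- def sortSunflowers(input):
--     kept = [i for i in input if 7 <= i[0] <= 15]
--     buckets = {}
--     for p, v in kept:
--         buckets[p] = buckets.get(p, []) + [v]
--     out = []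
--     for petals in range(15, 6, -1):
--         out.extend(buckets.get(petals, []))
--     return out
-- ===== Notes on version B (the rewrite author's own statement) =====
-- stated objective: alternative
-- what changed: Replaces A's nine full rescans of the input (one per petal count 15..7) with a single bucketing pass into a dict keyed by petal count, then one concatenation of the buckets in descending petal order.
import Mathlib
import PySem

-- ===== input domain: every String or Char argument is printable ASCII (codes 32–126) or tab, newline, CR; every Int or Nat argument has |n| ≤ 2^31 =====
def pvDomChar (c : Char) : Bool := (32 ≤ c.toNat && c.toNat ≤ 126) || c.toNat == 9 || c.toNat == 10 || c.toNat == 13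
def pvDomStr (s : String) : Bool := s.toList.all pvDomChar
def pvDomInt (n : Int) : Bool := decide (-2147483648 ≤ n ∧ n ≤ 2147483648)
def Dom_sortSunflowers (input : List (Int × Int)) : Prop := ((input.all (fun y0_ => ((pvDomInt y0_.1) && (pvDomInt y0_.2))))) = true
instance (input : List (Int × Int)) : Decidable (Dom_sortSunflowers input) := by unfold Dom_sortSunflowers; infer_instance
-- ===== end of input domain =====

-- B replaces A's nine full rescans of the input by one bucketing pass plus a bucket
-- concatenation in descending petal order (alternative decomposition, same cost).

-- ===== PORT A =====
-- while petals > 6: for i in input: if i[0] == petals: sortedlist.append(i[1]); petals -= 1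
def sortSunflowersGo (input : List (Int × Int)) (sortedlist : List Int) (petals : Int) : List Int :=
  if _h : petals > 6 then
    sortSunflowersGo input
      (input.foldl (fun acc i => if i.1 = petals then acc ++ [i.2] else acc) sortedlist)
      (petals - 1)
  else sortedlist
termination_by petals.toNat
decreasing_by omega

def sortSunflowers (input : List (Int × Int)) : List Int :=
  sortSunflowersGo input [] 15

-- ===== PORT B =====
def sortSunflowers_alt (input : List (Int × Int)) : List Int :=
  let kept := input.filter (fun i => decide (7 ≤ i.1) && decide (i.1 ≤ 15))
  let buckets := kept.foldl (fun d p => d.modify p.1 [] (· ++ [p.2])) PySem.Dict.empty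
  (PySem.List.pyRange 15 6 (-1)).foldl (fun acc petals => acc ++ buckets.getD petals []) []

-- ===== PRECONDITION & SPEC =====
def Spec_sortSunflowers (input : List (Int × Int)) (out : List Int) : Prop := out = sortSunflowers_alt input
instance (input : List (Int × Int)) (out : List Int) : Decidable (Spec_sortSunflowers input out) := by unfold Spec_sortSunflowers; infer_instance

-- ===== CLAIM (what is proved, stated in full; the proofs are below) =====
def Claim_equal_sortSunflowers : Prop := ∀ (input : List (Int × Int)), Dom_sortSunflowers input → Spec_sortSunflowers input (sortSunflowers input)

-- ===== LEMMAS AND PROOFS =====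

-- one bucket, for a petal count inside 7..15, is exactly the values with that petal count
theorem bucket_eval (input : List (Int × Int)) (q : Int) (h1 : 7 ≤ q) (h2 : q ≤ 15) :
    ((input.filter (fun i => decide (7 ≤ i.1) && decide (i.1 ≤ 15))).foldl
        (fun d p => d.modify p.1 [] (· ++ [p.2])) PySem.Dict.empty).getD q [] =
      (input.filter (fun i => i.1 == q)).map (·.2) := by
  rw [PySem.Dict.getD_foldl_modify_append, PySem.Dict.getD_empty, List.filter_filter]
  rw [List.filter_congr (q := fun i => i.1 == q)]
  · simp
  · intro a _
    by_cases hq : a.1 = q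
    · simp [hq]; omega
    · simp [hq]

theorem foldl_step (l : List (Int × Int)) (acc : List Int) (p : Int) :
    l.foldl (fun acc i => if i.1 = p then acc ++ [i.2] else acc) acc
      = acc ++ (l.filter (fun i => i.1 == p)).map (·.2) := by
  have hfun : (fun i : Int × Int => i.1 == p) = (fun i : Int × Int => decide (i.1 = p)) := by
    funext i; by_cases hi : i.1 = p
    · simp [hi]
    · simp [hi]
  rw [hfun]
  exact PySem.List.foldl_append_ite (fun i : Int × Int => i.1 = p) (fun i : Int × Int => i.2) ..

theorem go_acc (input : List (Int × Int)) :
    ∀ (n : Nat) (p : Int), p.toNat ≤ n → ∀ acc,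
      sortSunflowersGo input acc p = acc ++ sortSunflowersGo input [] p := by
  intro n
  induction n with
  | zero =>
    intro p hp acc
    have h : ¬ p > 6 := by omega
    conv_lhs => rw [sortSunflowersGo]
    conv_rhs => rw [sortSunflowersGo]
    simp [dif_neg h]
  | succ n ih =>
    intro p hp acc
    by_cases h : p > 6
    · conv_lhs => rw [sortSunflowersGo]
      conv_rhs => rw [sortSunflowersGo]
      rw [dif_pos h, dif_pos h, foldl_step, foldl_step]
      rw [ih (p - 1) (by omega), ih (p - 1) (by omega)]
      simp only [List.nil_append, List.append_assoc]
      exact congrArg (acc ++ ·) (ih (p - 1) (by omega) _).symm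
    · conv_lhs => rw [sortSunflowersGo]
      conv_rhs => rw [sortSunflowersGo]
      simp [dif_neg h]

theorem go_eval (input : List (Int × Int)) (acc : List Int) (p : Int) (h : p > 6) :
    sortSunflowersGo input acc p =
      (acc ++ (input.filter (fun i => i.1 == p)).map (·.2)) ++
        (sortSunflowersGo input [] (p - 1)) := by
  conv_lhs => rw [sortSunflowersGo]
  rw [dif_pos h, foldl_step, go_acc input (p - 1).toNat (p - 1) (by omega)]

theorem sortSunflowers_spec : Claim_equal_sortSunflowers := by
  intro input _
  unfold Spec_sortSunflowers sortSunflowers sortSunflowers_alt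
  rw [show PySem.List.pyRange 15 6 (-1) = [15,14,13,12,11,10,9,8,7] from by decide]
  simp only [List.foldl]
  rw [bucket_eval input 15 (by norm_num) (by norm_num),
      bucket_eval input 14 (by norm_num) (by norm_num),
      bucket_eval input 13 (by norm_num) (by norm_num),
      bucket_eval input 12 (by norm_num) (by norm_num),
      bucket_eval input 11 (by norm_num) (by norm_num),
      bucket_eval input 10 (by norm_num) (by norm_num),
      bucket_eval input 9 (by norm_num) (by norm_num),
      bucket_eval input 8 (by norm_num) (by norm_num),
      bucket_eval input 7 (by norm_num) (by norm_num)]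
  rw [go_eval input [] 15 (by norm_num)]
  rw [go_eval input [] (15-1) (by norm_num)]
  rw [go_eval input [] (15-1-1) (by norm_num)]
  rw [go_eval input [] (15-1-1-1) (by norm_num)]
  rw [go_eval input [] (15-1-1-1-1) (by norm_num)]
  rw [go_eval input [] (15-1-1-1-1-1) (by norm_num)]
  rw [go_eval input [] (15-1-1-1-1-1-1) (by norm_num)]
  rw [go_eval input [] (15-1-1-1-1-1-1-1) (by norm_num)]
  rw [go_eval input [] (15-1-1-1-1-1-1-1-1) (by norm_num)]
  rw [show sortSunflowersGo input [] (15-1-1-1-1-1-1-1-1-1) = [] from by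
        rw [sortSunflowersGo]; norm_num]
  norm_num [List.append_assoc]
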